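-- pv_equiv track=rewrite | github.com/yakhyazadea/AOIS_4sem | aois_7_yakhyazade.py | find_closest_bigger_word
-- ===== SOURCE A (Python) =====
-- def get_g_l(g, l, a, s, index, matches):
--     if index < len(a):
--         g = g or (not(a[index]) and s[index] and not(l))
--         l = l or (a[index] and not(s[index]) and not(g))
--         if(a[index] == s[index]):
--             matches += 1
--         index += 1
--         return get_g_l(g, l, a, s, index, matches)
--     else:
--         return g, l, matches
--
-- def compare_words(a, s):
--     match = 0
--     g, l, matches = get_g_l(0, 0, a, s, 0, match)
--     if(g > l):
--         return ">"
--     if(g < l):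
--         return "<"
--     if(g == l):
--         return "="
--
-- def find_closest_bigger_word(words_array, the_word):
--     the_bigger_numbers_array = []
--     for word in words_array:
--         if(compare_words(the_word, word) == ">"):
--             the_bigger_numbers_array.append(word)
--     if (len(the_bigger_numbers_array) == 0):
--         return []
--     else:
--         array_2 = the_bigger_numbers_array.copy()
--         for i in range(len(the_bigger_numbers_array[0])):
--             the_closest_bigger_word = []
--             for word in array_2:
--                 if (word[i] == 0):
--                     the_closest_bigger_word.append(word)
--             if the_closest_bigger_word != []:
--                 array_2 = the_closest_bigger_word
--     return array_2
-- ===== SOURCE B (Python) =====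
-- def cmp_words(a, s):
--     # three-way compare on the zero/nonzero pattern, decided at the first differing column
--     for x, y in zip(a, s):
--         if (not x) != (not y):
--             return ">" if not x else "<"
--     return "="
--
-- def find_closest_bigger_word(words_array, the_word):
--     bigger = [w for w in words_array if cmp_words(the_word, w) == ">"]
--     if not bigger:
--         return []
--     m = bigger[0]
--     for w in bigger[1:]:
--         if cmp_words(w, m) == ">":
--             m = w
--     return [w for w in bigger if cmp_words(m, w) == "="]
-- ===== Notes on version B (the rewrite author's own statement) =====
-- stated objective: simpler
-- what changed: Replaces the column-by-column zero-elimination loop (which repeatedly re-filters the candidate list per column) with a single minimum-selection pass using the same three-way word comparison, followed by one pass collecting all ties with the minimum in original order.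
-- outside the precondition, e.g. on find_closest_bigger_word([[1, 1], [1, 0, 0], [1, 0, 1]], [0]): A returns [[1, 0, 0], [1, 0, 1]], B returns [[1, 0, 0]]
import Mathlib
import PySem

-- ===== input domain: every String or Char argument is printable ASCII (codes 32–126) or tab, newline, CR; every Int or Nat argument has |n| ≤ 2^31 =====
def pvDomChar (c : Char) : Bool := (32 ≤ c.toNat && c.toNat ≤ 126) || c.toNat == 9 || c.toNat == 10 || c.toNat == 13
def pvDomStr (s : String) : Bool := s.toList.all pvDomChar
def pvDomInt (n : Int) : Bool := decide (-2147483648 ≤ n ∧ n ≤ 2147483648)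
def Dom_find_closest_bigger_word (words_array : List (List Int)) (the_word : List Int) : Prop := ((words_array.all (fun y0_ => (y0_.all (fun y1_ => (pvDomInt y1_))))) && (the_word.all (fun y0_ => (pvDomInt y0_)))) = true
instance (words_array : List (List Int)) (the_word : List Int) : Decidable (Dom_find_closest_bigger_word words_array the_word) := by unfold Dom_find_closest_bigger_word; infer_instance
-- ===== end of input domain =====

-- B replaces A's column-by-column zero-elimination with one minimum-selection pass plus one tie-collection
-- pass through the same three-way comparison (objective: simpler). Equivalence is on the return value.

-- ===== PORT A =====
-- get_g_l: recursion on index; s[index] with index ≥ len(s) would be an IndexError — excluded by Pre_,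
-- so `List.getD` (exact for in-range indexes) is used.
def getGL (g l : Bool) (a s : List Int) (index : Nat) (matchCount : Int) : Bool × Bool × Int :=
  if index < a.length then
    let g' := g || (!(a.getD index 0 != 0) && (s.getD index 0 != 0) && !l)
    let l' := l || ((a.getD index 0 != 0) && !(s.getD index 0 != 0) && !g')
    let matchCount' := if a.getD index 0 == s.getD index 0 then matchCount + 1 else matchCount
    getGL g' l' a s (index + 1) matchCount'
  else (g, l, matchCount)
termination_by a.length - index

-- compare_words: g/l are Python truthiness values; `g > l` holds iff g truthy and l falsy.
def compareWords (a s : List Int) : String :=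
  let r := getGL false false a s 0 0
  if r.1 && !r.2.1 then ">" else if !r.1 && r.2.1 then "<" else "="

def find_closest_bigger_word (words_array : List (List Int)) (the_word : List Int) : List (List Int) :=
  let the_bigger_numbers_array :=
    words_array.foldl (fun acc word => if compareWords the_word word == ">" then acc ++ [word] else acc) []
  if the_bigger_numbers_array.length = 0 then []
  else
    (List.range (the_bigger_numbers_array.headD []).length).foldl
      (fun array_2 i =>
        -- word[i]: an IndexError here is excluded by Pre_; getD is exact in range.
        let the_closest_bigger_word :=
          array_2.foldl (fun acc word => if word.getD i 1 == 0 then acc ++ [word] else acc) []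
        if the_closest_bigger_word ≠ [] then the_closest_bigger_word else array_2)
      the_bigger_numbers_array

-- ===== PORT B =====
-- cmp_words: three-way compare decided at the first column whose zero/nonzero pattern differs (zip truncates).
def cmpWords : List Int → List Int → String
  | x :: xs, y :: ys =>
    if ((x == 0) != (y == 0)) then (if x == 0 then ">" else "<") else cmpWords xs ys
  | _, _ => "="

def find_closest_bigger_word_alt (words_array : List (List Int)) (the_word : List Int) : List (List Int) :=
  let bigger := words_array.filter (fun w => cmpWords the_word w == ">")
  match bigger with
  | [] => []
  | m0 :: rest =>
    let m := rest.foldl (fun m w => if cmpWords w m == ">" then w else m) m0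
    bigger.filter (fun w => cmpWords m w == "=")

-- ===== PRECONDITION & SPEC =====
-- Pre_ restricts to the natural domain of this columnwise word comparison: no word shorter than the_word,
-- and either all words of one common length or no word bigger than the_word (empty result).  It excludes the
-- inputs where A raises IndexError (a word shorter than the_word, or a ragged list reached by the column
-- loop) and also some ragged inputs with a non-empty filter on which A happens to return, where A's value
-- depends on the accidental length of the first filtered word.
def Pre_find_closest_bigger_word (words_array : List (List Int)) (the_word : List Int) : Prop :=
  (∀ w ∈ words_array, the_word.length ≤ w.length) ∧
  ((∀ w ∈ words_array, ∀ v ∈ words_array, w.length = v.length) ∨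
   (∀ w ∈ words_array, cmpWords the_word w ≠ ">"))
instance (words_array : List (List Int)) (the_word : List Int) : Decidable (Pre_find_closest_bigger_word words_array the_word) := by unfold Pre_find_closest_bigger_word; infer_instance

def pvWitness_find_closest_bigger_word : List (List Int) × List Int := ([[1, 1], [1, 0]], [0, 1])

def Spec_find_closest_bigger_word (words_array : List (List Int)) (the_word : List Int) (out : List (List Int)) : Prop := out = find_closest_bigger_word_alt words_array the_word
instance (words_array : List (List Int)) (the_word : List Int) (out : List (List Int)) : Decidable (Spec_find_closest_bigger_word words_array the_word out) := by unfold Spec_find_closest_bigger_word; infer_instance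

-- ===== CLAIM (what is proved, stated in full; the proofs are below) =====
def Claim_equal_find_closest_bigger_word : Prop := ∀ (words_array : List (List Int)) (the_word : List Int), Dom_find_closest_bigger_word words_array the_word → Pre_find_closest_bigger_word words_array the_word → Spec_find_closest_bigger_word words_array the_word (find_closest_bigger_word words_array the_word)

-- ===== LEMMAS AND PROOFS =====

-- The g/l state machine of get_g_l, written as structural recursion over the two suffixes.
def glStep (g l : Bool) : List Int → List Int → Bool × Bool
  | x :: xs, y :: ys =>
    let g' := g || (!(x != 0) && (y != 0) && !l)
    let l' := l || ((x != 0) && !(y != 0) && !g')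
    glStep g' l' xs ys
  | _, _ => (g, l)

lemma glStep_nil (g l : Bool) (ys : List Int) : glStep g l [] ys = (g, l) := by
  cases ys <;> rfl

lemma glStep_lock_g : ∀ (xs ys : List Int), glStep true false xs ys = (true, false) := by
  intro xs
  induction xs with
  | nil => intro ys; rfl
  | cons x xs ih => intro ys; cases ys with
    | nil => rfl
    | cons y ys => simp [glStep, ih]

lemma glStep_lock_l : ∀ (xs ys : List Int), glStep false true xs ys = (false, true) := by
  intro xs
  induction xs with
  | nil => intro ys; rfl
  | cons x xs ih => intro ys; cases ys with
    | nil => rfl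
    | cons y ys => simp [glStep, ih]

lemma getGL_eq_glStep : ∀ (n : Nat) (a s : List Int) (idx : Nat) (g l : Bool) (m : Int),
    a.length - idx ≤ n → a.length ≤ s.length →
    ((getGL g l a s idx m).1, (getGL g l a s idx m).2.1) = glStep g l (a.drop idx) (s.drop idx) := by
  intro n
  induction n with
  | zero =>
    intro a s idx g l m hn hlen
    have hge : a.length ≤ idx := by omega
    rw [getGL]
    simp only [Nat.not_lt.mpr hge, if_false]
    rw [List.drop_eq_nil_of_le hge, glStep_nil]
  | succ n ih =>
    intro a s idx g l m hn hlen
    by_cases h : idx < a.length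
    · have hs : idx < s.length := lt_of_lt_of_le h hlen
      rw [getGL]
      simp only [h, if_true]
      rw [List.drop_eq_getElem_cons h, List.drop_eq_getElem_cons hs, glStep,
        List.getD_eq_getElem a 0 h, List.getD_eq_getElem s 0 hs]
      exact ih a s (idx + 1) _ _ _ (by omega) hlen
    · rw [getGL]
      simp only [h, if_false]
      rw [List.drop_eq_nil_of_le (Nat.not_lt.mp h), glStep_nil]

lemma cmpWords_cases : ∀ (a s : List Int), cmpWords a s = ">" ∨ cmpWords a s = "<" ∨ cmpWords a s = "=" := by
  intro a
  induction a with
  | nil => intro s; right; right; rfl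
  | cons x xs ih =>
    intro s
    cases s with
    | nil => right; right; rfl
    | cons y ys =>
      cases hx : (x == 0) <;> cases hy : (y == 0) <;>
        simp [cmpWords, hx, hy] <;> exact ih ys

lemma glStep_eq_cmpWords : ∀ (xs ys : List Int),
    glStep false false xs ys =
      (if cmpWords xs ys = ">" then (true, false)
       else if cmpWords xs ys = "<" then (false, true) else (false, false)) := by
  intro xs
  induction xs with
  | nil => intro ys; cases ys <;> simp [glStep, cmpWords]
  | cons x xs ih =>
    intro ys
    cases ys with
    | nil => simp [glStep, cmpWords]
    | cons y ys =>
      cases hx : (x == 0) <;> cases hy : (y == 0) <;>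
        simp [glStep, cmpWords, bne, hx, hy, ih, glStep_lock_g, glStep_lock_l]

lemma compareWords_eq_cmpWords (a s : List Int) (h : a.length ≤ s.length) :
    compareWords a s = cmpWords a s := by
  have h1 := getGL_eq_glStep a.length a s 0 false false 0 (by omega) h
  rw [List.drop_zero, List.drop_zero, glStep_eq_cmpWords] at h1
  unfold compareWords
  rcases cmpWords_cases a s with hc | hc | hc <;>
    simp [hc] at h1 <;> simp [hc, h1.1, h1.2]

lemma cmpWords_refl : ∀ (a : List Int), cmpWords a a = "=" := by
  intro a
  induction a with
  | nil => rfl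
  | cons x xs ih => simp [cmpWords, ih]

lemma cmpWords_eq_symm : ∀ (a b : List Int), cmpWords a b = "=" → cmpWords b a = "=" := by
  intro a
  induction a with
  | nil => intro b _; cases b <;> rfl
  | cons x xs ih =>
    intro b
    cases b with
    | nil => intro _; rfl
    | cons y ys =>
      cases hx : (x == 0) <;> cases hy : (y == 0) <;>
        simp [cmpWords, hx, hy] <;> exact ih ys

lemma cmpWords_gt_trans : ∀ (a b c : List Int),
    cmpWords a b = ">" → cmpWords b c = ">" → cmpWords a c = ">" := by
  intro a
  induction a with
  | nil => intro b c h1 _; simp [cmpWords] at h1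
  | cons x xs ih =>
    intro b c h1 h2
    cases b with
    | nil => simp [cmpWords] at h1
    | cons y ys =>
      cases c with
      | nil => simp [cmpWords] at h2
      | cons z zs =>
        cases hx : (x == 0) <;> cases hy : (y == 0) <;> cases hz : (z == 0) <;>
          simp [cmpWords, hx, hy, hz] at h1 h2 ⊢ <;>
          exact ih ys zs h1 h2

lemma cmpWords_congr_left : ∀ (a b : List Int), a.length = b.length → cmpWords a b = "=" →
    ∀ c, cmpWords a c = cmpWords b c := by
  intro a
  induction a with
  | nil =>
    intro b hlen _ c
    cases b with
    | nil => rfl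
    | cons y ys => simp at hlen
  | cons x xs ih =>
    intro b hlen heq c
    cases b with
    | nil => simp at hlen
    | cons y ys =>
      cases c with
      | nil => rfl
      | cons z zs =>
        cases hx : (x == 0) <;> cases hy : (y == 0) <;>
          simp [cmpWords, hx, hy] at heq ⊢ <;>
          rw [ih ys (by simpa using hlen) heq zs]

lemma cmpWords_eq_of_not_gt : ∀ (a b : List Int), a.length = b.length →
    cmpWords a b ≠ ">" → cmpWords b a ≠ ">" → cmpWords a b = "=" := by
  intro a
  induction a with
  | nil =>
    intro b hlen _ _
    cases b with
    | nil => rfl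
    | cons y ys => simp at hlen
  | cons x xs ih =>
    intro b hlen h1 h2
    cases b with
    | nil => simp at hlen
    | cons y ys =>
      cases hx : (x == 0) <;> cases hy : (y == 0) <;>
        simp [cmpWords, hx, hy] at h1 h2 ⊢ <;>
        exact ih ys (by simpa using hlen) h1 h2

lemma cmpWords_append_of_eq : ∀ (xs ys a' b' : List Int), xs.length = ys.length →
    cmpWords xs ys = "=" → cmpWords (xs ++ a') (ys ++ b') = cmpWords a' b' := by
  intro xs
  induction xs with
  | nil =>
    intro ys a' b' hlen _
    cases ys with
    | nil => rfl
    | cons y ys => simp at hlen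
  | cons x xs ih =>
    intro ys a' b' hlen heq
    cases ys with
    | nil => simp at hlen
    | cons y ys =>
      cases hx : (x == 0) <;> cases hy : (y == 0) <;>
        simp [cmpWords, hx, hy] at heq ⊢ <;>
        exact ih ys a' b' (by simpa using hlen) heq

lemma cmpWords_append_of_ne : ∀ (xs ys a' b' : List Int), xs.length = ys.length →
    cmpWords xs ys ≠ "=" → cmpWords (xs ++ a') (ys ++ b') = cmpWords xs ys := by
  intro xs
  induction xs with
  | nil =>
    intro ys a' b' hlen hne
    cases ys with
    | nil => simp [cmpWords] at hne
    | cons y ys => simp at hlen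
  | cons x xs ih =>
    intro ys a' b' hlen hne
    cases ys with
    | nil => simp at hlen
    | cons y ys =>
      cases hx : (x == 0) <;> cases hy : (y == 0) <;>
        simp [cmpWords, hx, hy] at hne ⊢ <;>
        exact ih ys a' b' (by simpa using hlen) hne

-- the minimum fold of B: membership and minimality
lemma minFold_mem : ∀ (t : List (List Int)) (m0 : List Int),
    (t.foldl (fun m w => if cmpWords w m == ">" then w else m) m0) ∈ m0 :: t := by
  intro t
  induction t with
  | nil => intro m0; simp
  | cons v t ih =>
    intro m0
    simp only [List.foldl_cons]
    have h := ih (if cmpWords v m0 == ">" then v else m0)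
    by_cases hc : cmpWords v m0 = ">" <;> simp [hc] at h ⊢ <;>
      rcases h with h | h <;> simp [h]

lemma minFold_min : ∀ (t : List (List Int)) (m0 : List Int) (LL : Nat),
    m0.length = LL → (∀ w ∈ t, w.length = LL) →
    ∀ w ∈ m0 :: t, cmpWords w (t.foldl (fun m w => if cmpWords w m == ">" then w else m) m0) ≠ ">" := by
  intro t
  induction t with
  | nil =>
    intro m0 LL h0 ht w hw hgt
    simp at hw
    subst hw
    rw [List.foldl_nil] at hgt
    exact absurd hgt (by simp [cmpWords_refl])
  | cons v t ih =>
    intro m0 LL h0 ht w hw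
    simp only [List.foldl_cons]
    have hvlen : v.length = LL := ht v List.mem_cons_self
    have htt : ∀ u ∈ t, u.length = LL := fun u hu => ht u (List.mem_cons_of_mem _ hu)
    by_cases hc : cmpWords v m0 = ">"
    · -- the candidate v replaces m0
      have ihm := ih v LL hvlen htt
      simp only [hc, show ((">" : String) == ">") = true from rfl, if_true]
      simp only [List.mem_cons] at hw
      rcases hw with hw | hw | hw
      · -- w = m0 : if m0 beat the result, then v beat it too (transitivity), contradiction
        intro hgt
        rw [hw] at hgt
        exact ihm v List.mem_cons_self (cmpWords_gt_trans v m0 _ hc hgt)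
      · rw [hw]; exact ihm v List.mem_cons_self
      · exact ihm w (List.mem_cons_of_mem _ hw)
    · -- m0 stays
      have ihm := ih m0 LL h0 htt
      simp only [show (cmpWords v m0 == ">") = false by simp [hc], Bool.false_eq_true, if_false]
      simp only [List.mem_cons] at hw
      rcases hw with hw | hw | hw
      · rw [hw]; exact ihm m0 List.mem_cons_self
      · -- w = v : ¬(v < m0); either m0 < v (transitivity) or v = m0 as patterns (congruence)
        rw [hw]
        intro hgt
        by_cases hmv : cmpWords m0 v = ">"
        · exact ihm m0 List.mem_cons_self (cmpWords_gt_trans m0 v _ hmv hgt)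
        · have hvm : cmpWords v m0 = "=" :=
            cmpWords_eq_of_not_gt v m0 (by rw [hvlen, h0]) hc hmv
          rw [cmpWords_congr_left v m0 (by rw [hvlen, h0]) hvm] at hgt
          exact ihm m0 List.mem_cons_self hgt
      · exact ihm w (List.mem_cons_of_mem _ hw)

-- A's column-elimination loop computes exactly the tie class of the minimum.
lemma narrow_invariant (F : List (List Int)) (LL : Nat) (m : List Int)
    (hF : ∀ w ∈ F, w.length = LL) (hm : m ∈ F)
    (hmin : ∀ w ∈ F, cmpWords w m ≠ ">") :
    ∀ k, k ≤ LL →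
      (List.range k).foldl
        (fun array_2 i =>
          let c := array_2.foldl (fun acc word => if word.getD i 1 == 0 then acc ++ [word] else acc) []
          if c ≠ [] then c else array_2) F
      = F.filter (fun w => cmpWords (w.take k) (m.take k) == "=") := by
  have hmlen : m.length = LL := hF m hm
  intro k
  induction k with
  | zero =>
    intro _
    simp only [List.range_zero, List.foldl_nil, List.take_zero]
    exact (List.filter_eq_self.mpr (fun w _ => by simp [cmpWords])).symm
  | succ k ih =>
    intro hk1
    have hklt : k < LL := by omega
    rw [List.range_succ, List.foldl_append, ih (by omega), List.foldl_cons, List.foldl_nil]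
    simp only []
    rw [PySem.List.foldl_append_if_eq_filter, List.nil_append, List.filter_filter]
    -- pointwise: the (k+1)-column tie test is the k-column tie test plus agreement in column k
    have hPsucc : ∀ w ∈ F, (cmpWords (w.take (k + 1)) (m.take (k + 1)) == "=") =
        ((cmpWords (w.take k) (m.take k) == "=") && ((w.getD k 1 == 0) == (m.getD k 1 == 0))) := by
      intro w hw
      have hkw : k < w.length := by rw [hF w hw]; exact hklt
      have hkm : k < m.length := by rw [hmlen]; exact hklt
      have hlen : (w.take k).length = (m.take k).length := by
        simp [List.length_take, hF w hw, hmlen]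
      rw [List.take_succ_eq_append_getElem hkw, List.take_succ_eq_append_getElem hkm,
        List.getD_eq_getElem w 1 hkw, List.getD_eq_getElem m 1 hkm]
      by_cases hPk : cmpWords (w.take k) (m.take k) = "="
      · rw [cmpWords_append_of_eq _ _ _ _ hlen hPk, hPk]
        cases hb1 : (w[k] == 0) <;> cases hb2 : (m[k] == 0) <;>
          simp [cmpWords, hb1, hb2]
      · rw [cmpWords_append_of_ne _ _ _ _ hlen hPk]
        simp [hPk]
    by_cases hcne : F.filter (fun w => (w.getD k 1 == 0) && (cmpWords (w.take k) (m.take k) == "=")) = []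
    · -- no surviving word has a zero in column k; in particular m has not, and the list is unchanged
      rw [hcne]
      simp only [ne_eq, not_true_eq_false, if_false]
      have hmPk : (cmpWords (m.take k) (m.take k) == "=") = true := by
        simp [cmpWords_refl]
      have hmbit : (m.getD k 1 == 0) = false := by
        have := List.filter_eq_nil_iff.mp hcne m hm
        cases h : (m.getD k 1 == 0)
        · rfl
        · rw [h, hmPk] at this; simp at this
      refine List.filter_congr (fun w hw => ?_)
      rw [hPsucc w hw, hmbit]
      have hnot := List.filter_eq_nil_iff.mp hcne w hw
      cases hPk : (cmpWords (w.take k) (m.take k) == "=")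
      · simp
      · cases hb : (w.getD k 1 == 0)
        · simp
        · rw [hPk, hb] at hnot; simp at hnot
    · -- some surviving word has a zero in column k; minimality forces m to have one too
      simp only [ne_eq, hcne, not_false_eq_true, if_true]
      obtain ⟨u, hu⟩ := List.exists_mem_of_ne_nil _ hcne
      obtain ⟨hw0F, hw0p⟩ := List.mem_filter.mp hu
      have hw0bit : (u.getD k 1 == 0) = true := by
        have := hw0p; simp only [Bool.and_eq_true] at this; exact this.1
      have hw0Pk : cmpWords (u.take k) (m.take k) = "=" := by
        have := hw0p; simp only [Bool.and_eq_true] at this; simpa using this.2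
      have hk0 : k < u.length := by rw [hF u hw0F]; exact hklt
      have hkm : k < m.length := by rw [hmlen]; exact hklt
      have hmbit : (m.getD k 1 == 0) = true := by
        cases h : (m.getD k 1 == 0)
        · -- otherwise cmpWords u m = ">", contradicting minimality of m
          exfalso
          apply hmin u hw0F
          have hsplit : cmpWords u m =
              cmpWords (u.take k ++ u.drop k) (m.take k ++ m.drop k) := by
            rw [List.take_append_drop, List.take_append_drop]
          rw [hsplit, cmpWords_append_of_eq _ _ _ _
              (by simp [List.length_take, hF u hw0F, hmlen]) hw0Pk,
            List.drop_eq_getElem_cons hk0, List.drop_eq_getElem_cons hkm]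
          have hb0 : (u[k] == 0) = true := by
            rw [List.getD_eq_getElem u 1 hk0] at hw0bit; exact hw0bit
          have hbm : (m[k] == 0) = false := by
            rw [List.getD_eq_getElem m 1 hkm] at h; exact h
          simp [cmpWords, hb0, hbm]
        · rfl
      refine List.filter_congr (fun w hw => ?_)
      rw [hPsucc w hw, hmbit]
      cases hPk : (cmpWords (w.take k) (m.take k) == "=") <;>
        cases hb : (w.getD k 1 == 0) <;> simp

-- ===== VERDICT (by name: the statement is the Claim_ definition above) =====
theorem find_closest_bigger_word_spec : Claim_equal_find_closest_bigger_word := by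
  intro wa tw _ hpre
  obtain ⟨hge, hrest⟩ := hpre
  unfold Spec_find_closest_bigger_word find_closest_bigger_word find_closest_bigger_word_alt
  rw [PySem.List.foldl_append_if_eq_filter, List.nil_append]
  have hsame : wa.filter (fun w => compareWords tw w == ">") =
      wa.filter (fun w => cmpWords tw w == ">") :=
    List.filter_congr (fun w hw => by rw [compareWords_eq_cmpWords tw w (hge w hw)])
  rw [hsame]
  rcases hrest with heqlen | hempty
  case inr =>
    rw [List.filter_eq_nil_iff.mpr (fun w hw => by simp [hempty w hw])]
    rfl
  cases hF : wa.filter (fun w => cmpWords tw w == ">") with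
  | nil => simp
  | cons m0 rest =>
    have hsub : ∀ w ∈ m0 :: rest, w ∈ wa := fun w hw => List.mem_of_mem_filter (hF ▸ hw)
    have hFlen : ∀ w ∈ m0 :: rest, w.length = m0.length :=
      fun w hw => heqlen w (hsub w hw) m0 (hsub m0 List.mem_cons_self)
    set mw := rest.foldl (fun m w => if cmpWords w m == ">" then w else m) m0 with hmw
    have hmF : mw ∈ m0 :: rest := minFold_mem rest m0
    have hmin : ∀ w ∈ m0 :: rest, cmpWords w mw ≠ ">" :=
      minFold_min rest m0 m0.length rfl (fun w hw => hFlen w (List.mem_cons_of_mem _ hw))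
    have hinv := narrow_invariant (m0 :: rest) m0.length mw hFlen hmF hmin m0.length (le_refl _)
    rw [if_neg (by simp), List.headD_cons, hinv]
    show List.filter (fun w => cmpWords (List.take m0.length w) (List.take m0.length mw) == "=")
        (m0 :: rest) = List.filter (fun w => cmpWords mw w == "=") (m0 :: rest)
    refine List.filter_congr (fun w hw => ?_)
    rw [List.take_of_length_le (le_of_eq (hFlen w hw)),
      List.take_of_length_le (le_of_eq (hFlen mw hmF))]
    by_cases hwm : cmpWords w mw = "="
    · rw [hwm, cmpWords_eq_symm w mw hwm]
    · have hmw' : cmpWords mw w ≠ "=" := fun h => hwm (cmpWords_eq_symm mw w h)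
      simp [hwm, hmw']
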